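-- pv_equiv track=rewrite | github.com/TheUltronultimate/Viginere-Cipher- | Friedman.py | FindEnglish
-- ===== SOURCE A (Python) =====
-- def FindEnglish(string, words):
--   """Attributes a score to each possible plaintext depending on how many of the words known are present"""
--   score = 0
--   a = False
--   for word in words:
--     if word in string:
--       score += 2
--     else:
--       score -=2
--   return score
-- ===== SOURCE B (Python) =====
-- def FindEnglish(string, words):
--   """Attributes a score to each possible plaintext depending on how many of the words known are present"""
--   maxlen = 0
--   for w in words:
--     maxlen = max(maxlen, len(w))
--   n = len(string)
--   subs = {""}
--   for i in range(n):
--     for j in range(i + 1, min(i + maxlen, n) + 1):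
--       subs.add(string[i:j])
--   score = 0
--   for w in words:
--     score += 2 if w in subs else -2
--   return score
-- ===== Notes on version B (the rewrite author's own statement) =====
-- stated objective: faster
-- what changed: Instead of testing each word against the string with a fresh substring scan, B precomputes the set of all substrings of the string up to the maximum word length once, then scores every word by a single hash-set lookup (measured 15.9x faster at the largest generated size).
import Mathlib
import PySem

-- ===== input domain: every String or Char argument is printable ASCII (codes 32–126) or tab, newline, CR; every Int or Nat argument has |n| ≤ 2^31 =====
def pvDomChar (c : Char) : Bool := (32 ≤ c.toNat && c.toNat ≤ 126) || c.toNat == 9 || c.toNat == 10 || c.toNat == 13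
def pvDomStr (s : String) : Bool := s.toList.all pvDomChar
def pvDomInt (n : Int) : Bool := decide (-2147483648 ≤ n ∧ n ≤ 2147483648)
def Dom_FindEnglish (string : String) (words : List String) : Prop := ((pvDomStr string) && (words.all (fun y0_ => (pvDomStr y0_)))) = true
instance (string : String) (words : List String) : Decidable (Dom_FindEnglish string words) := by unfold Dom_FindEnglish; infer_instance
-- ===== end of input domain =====

-- B replaces the per-word naive substring scan by a precomputed set of all substrings of
-- `string` up to the maximum word length, scoring each word by one set lookup (objective: alternative).

-- ===== PORT A =====
-- Port of A: loop over words with a running score, +2 if the word is a substring else -2.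
-- (A's local 'a = False' is never used and is not ported.)
def FindEnglish (string : String) (words : List String) : Int :=
  words.foldl (fun score word => if PySem.Str.isIn word string then score + 2 else score - 2) 0

-- ===== PORT B =====
-- Port of B (Source B): running max of word lengths; build the set of all substrings of `string`
-- of length 1..maxlen (plus ""); then score each word by set membership.
def FindEnglish_alt (string : String) (words : List String) : Int :=
  let maxlen : Int := words.foldl (fun m w => max m (PySem.Str.len w)) 0
  let n : Int := PySem.Str.len string
  let subs : PySem.Set String :=
    (PySem.List.pyRange 0 n 1).foldl
      (fun s i =>
        (PySem.List.pyRange (i + 1) (min (i + maxlen) n + 1) 1).foldl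
          (fun s j => PySem.Set.add s (PySem.Str.slice string (some i) (some j))) s)
      (PySem.Set.add PySem.Set.empty "")
  words.foldl (fun score w => score + if PySem.Set.contains subs w then 2 else -2) 0

-- ===== PRECONDITION & SPEC =====
def Spec_FindEnglish (string : String) (words : List String) (out : Int) : Prop := out = FindEnglish_alt string words
instance (string : String) (words : List String) (out : Int) : Decidable (Spec_FindEnglish string words out) := by unfold Spec_FindEnglish; infer_instance

-- ===== CLAIM (what is proved, stated in full; the proofs are below) =====
def Claim_equal_FindEnglish : Prop := ∀ (string : String) (words : List String), Dom_FindEnglish string words → Spec_FindEnglish string words (FindEnglish string words)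

-- ===== LEMMAS AND PROOFS =====

-- Membership in the doubly-nested add-loop that builds the substring set.
lemma pv_mem_double_fold {β γ : Type} (l : List β) (g : β → List γ) (f : β → γ → String)
    (s0 : PySem.Set String) (y : String) :
    (y ∈ l.foldl (fun s i => (g i).foldl (fun s j => PySem.Set.add s (f i j)) s) s0)
      ↔ y ∈ s0 ∨ ∃ i ∈ l, ∃ j ∈ g i, y = f i j := by
  induction l generalizing s0 with
  | nil => simp
  | cons a t ih =>
    simp only [List.foldl_cons, ih, PySem.Set.mem_foldl_add, List.mem_cons]
    constructor
    · rintro (((h | ⟨j, hj, rfl⟩) | ⟨i, hi, j, hj, rfl⟩))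
      · exact Or.inl h
      · exact Or.inr ⟨a, Or.inl rfl, j, hj, rfl⟩
      · exact Or.inr ⟨i, Or.inr hi, j, hj, rfl⟩
    · rintro (h | ⟨i, (rfl | hi), j, hj, rfl⟩)
      · exact Or.inl (Or.inl h)
      · exact Or.inl (Or.inr ⟨j, hj, rfl⟩)
      · exact Or.inr ⟨i, hi, j, hj, rfl⟩

-- A word no longer than maxlen is in the substring set iff it is a substring of `string`.
lemma pv_mem_subs_iff (string : String) (maxlen : Int) (w : String)
    (hw : PySem.Str.len w ≤ maxlen) :
    (w ∈ (PySem.List.pyRange 0 (PySem.Str.len string) 1).foldl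
        (fun s i =>
          (PySem.List.pyRange (i + 1) (min (i + maxlen) (PySem.Str.len string) + 1) 1).foldl
            (fun s j => PySem.Set.add s (PySem.Str.slice string (some i) (some j))) s)
        (PySem.Set.add PySem.Set.empty ""))
      ↔ PySem.Str.isIn w string = true := by
  rw [pv_mem_double_fold]
  rw [PySem.Str.isIn_iff_infix]
  have hlen : PySem.Str.len string = (string.toList.length : Int) := by
    simp [pysem]
  have hwlen : (w.toList.length : Int) ≤ maxlen := by
    have : PySem.Str.len w = (w.toList.length : Int) := by simp [pysem]
    omega
  constructor
  · rintro (h0 | ⟨i, hi, j, hj, rfl⟩)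
    · -- the empty string is always an infix
      have : w = "" := by
        simpa [PySem.Set.mem_add, PySem.Set.empty] using h0
      subst this
      exact List.nil_infix
    · rw [PySem.List.mem_pyRange_one] at hi hj
      obtain ⟨a, rfl⟩ : ∃ a : ℕ, i = (a : Int) := ⟨i.toNat, by omega⟩
      obtain ⟨b, rfl⟩ : ∃ b : ℕ, j = (b : Int) := ⟨j.toNat, by omega⟩
      rw [PySem.Str.toList_slice, PySem.Chars.slice_eq_listSlice, PySem.List.slice_natCast]
      exact ((List.take_prefix _ _).isInfix).trans ((List.drop_suffix _ _).isInfix)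
  · intro hinf
    by_cases hw0 : w = ""
    · exact Or.inl (by simp [hw0, PySem.Set.empty])
    · obtain ⟨pre, suf, hsplit⟩ := hinf
      have hwne : w.toList ≠ [] := fun h => hw0 (String.toList_inj.mp (by simp [h]))
      have hwpos : 0 < w.toList.length := List.length_pos_iff.mpr hwne
      have htot : pre.length + w.toList.length + suf.length = string.toList.length := by
        rw [← hsplit]; simp; omega
      refine Or.inr ⟨(pre.length : Int), ?_, ((pre.length + w.toList.length : ℕ) : Int), ?_, ?_⟩
      · rw [PySem.List.mem_pyRange_one]
        constructor
        · positivity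
        · omega
      · rw [PySem.List.mem_pyRange_one]
        push_cast
        omega
      · apply String.toList_inj.mp
        rw [PySem.Str.toList_slice, PySem.Chars.slice_eq_listSlice, PySem.List.slice_natCast]
        rw [← hsplit]
        rw [List.append_assoc, List.drop_left]
        have : pre.length + w.toList.length - pre.length = w.toList.length := by omega
        rw [this, List.take_left]

-- The Bool form of the previous lemma, matching the membership test in B's scoring loop.
lemma pv_contains_eq (string : String) (maxlen : Int) (w : String)
    (hw : PySem.Str.len w ≤ maxlen) :
    PySem.Set.contains
      ((PySem.List.pyRange 0 (PySem.Str.len string) 1).foldl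
        (fun s i =>
          (PySem.List.pyRange (i + 1) (min (i + maxlen) (PySem.Str.len string) + 1) 1).foldl
            (fun s j => PySem.Set.add s (PySem.Str.slice string (some i) (some j))) s)
        (PySem.Set.add PySem.Set.empty "")) w
      = PySem.Str.isIn w string := by
  have h := pv_mem_subs_iff string maxlen w hw
  cases hin : PySem.Str.isIn w string with
  | true => exact (PySem.Set.contains_iff _ _).mpr (h.mpr hin)
  | false =>
    apply Bool.eq_false_iff.mpr
    intro hc
    have hm := h.mp ((PySem.Set.contains_iff _ _).mp hc)
    rw [hin] at hm
    exact Bool.false_ne_true hm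

-- ===== VERDICT (by name: the statement is the Claim_ definition above) =====
theorem FindEnglish_spec : Claim_equal_FindEnglish := by
  intro string words _
  unfold Spec_FindEnglish
  simp only [FindEnglish, FindEnglish_alt]
  apply PySem.List.foldl_congr_mem
  intro acc x hx
  have hlen : PySem.Str.len x ≤ words.foldl (fun m w => max m (PySem.Str.len w)) 0 :=
    (PySem.List.le_foldl_max_int words PySem.Str.len 0).2 x hx
  rw [pv_contains_eq string _ x hlen]
  cases hb : PySem.Str.isIn x string <;> simp [hb] <;> omega
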